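-- pv_equiv track=rewrite | github.com/DailyForkCast/osint-foresight | src/validation/counterfactual_queries.py | _find_contradictory_sources
-- ===== SOURCE A (Python) =====
-- from typing import Dict, List, Any, Optional, Tuple
--
-- def _find_contradictory_sources(evidence: List[Dict]) -> str:
--     """Find sources that contradict current evidence"""
--
--     current_sources = [e.get("source", "") for e in evidence]
--
--     # Identify alternative authoritative sources
--     alternative_sources = []
--
--     if not any("government" in s.lower() for s in current_sources):
--         alternative_sources.append("government registry data")
--
--     if not any("academic" in s.lower() for s in current_sources):
--         alternative_sources.append("peer-reviewed publications")
--
--     if not any("industry" in s.lower() for s in current_sources):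
--         alternative_sources.append("industry reports")
--
--     return f"Check contradictory sources: {', '.join(alternative_sources)}"
-- ===== SOURCE B (Python) =====
-- # Bitmask + precomputed answer table: one early-exiting pass computes a 3-bit
-- # presence mask; the full result suffix is looked up in a table of all 8 answers.
-- _SUFFIXES = (
--     "government registry data, peer-reviewed publications, industry reports",  # 0b000
--     "peer-reviewed publications, industry reports",                            # 0b001 gov
--     "government registry data, industry reports",                              # 0b010 acad
--     "industry reports",                                                        # 0b011
--     "government registry data, peer-reviewed publications",                    # 0b100 ind
--     "peer-reviewed publications",                                              # 0b101
--     "government registry data",                                                # 0b110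
--     "",                                                                        # 0b111
-- )
--
-- def _find_contradictory_sources(evidence):
--     """Find sources that contradict current evidence"""
--     g = a = i = False
--     for e in evidence:
--         low = e.get("source", "").lower()
--         g = g or "government" in low
--         a = a or "academic" in low
--         i = i or "industry" in low
--         if g and a and i:
--             break  # all keywords already seen; the answer is fixed
--     return "Check contradictory sources: " + _SUFFIXES[g + 2 * a + 4 * i]
-- ===== Notes on version B (the rewrite author's own statement) =====
-- stated objective: alternative
-- what changed: Single early-exiting pass over the evidence accumulates a 3-bit presence mask, and the complete suggestion suffix is fetched from a precomputed table of all 8 possible answers instead of conditionally appending and joining pieces.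
import Mathlib
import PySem

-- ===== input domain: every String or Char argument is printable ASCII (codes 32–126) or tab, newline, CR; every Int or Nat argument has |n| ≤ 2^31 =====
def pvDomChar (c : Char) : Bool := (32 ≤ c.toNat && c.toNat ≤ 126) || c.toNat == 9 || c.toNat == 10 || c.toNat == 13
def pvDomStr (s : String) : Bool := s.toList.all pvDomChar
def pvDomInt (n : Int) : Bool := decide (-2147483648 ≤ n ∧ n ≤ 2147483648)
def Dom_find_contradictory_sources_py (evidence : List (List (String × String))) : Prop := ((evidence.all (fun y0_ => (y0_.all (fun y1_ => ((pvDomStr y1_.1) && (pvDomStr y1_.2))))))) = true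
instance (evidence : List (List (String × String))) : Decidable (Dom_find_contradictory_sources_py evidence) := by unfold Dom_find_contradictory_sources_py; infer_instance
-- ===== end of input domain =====

-- B replaces A's three any()-scans and runtime join with one early-exiting pass
-- building a 3-bit presence mask plus a lookup in a precomputed 8-entry answer table.


-- ===== PORT A =====
def find_contradictory_sources_py (evidence : List (List (String × String))) : String :=
  let current_sources := evidence.map (fun e => PySem.Dict.getD (PySem.Dict.mk e) "source" "")
  let alternative_sources : List String := []
  let alternative_sources :=
    if !(current_sources.any (fun s => PySem.Str.isIn "government" (PySem.Str.lower s))) then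
      alternative_sources ++ ["government registry data"] else alternative_sources
  let alternative_sources :=
    if !(current_sources.any (fun s => PySem.Str.isIn "academic" (PySem.Str.lower s))) then
      alternative_sources ++ ["peer-reviewed publications"] else alternative_sources
  let alternative_sources :=
    if !(current_sources.any (fun s => PySem.Str.isIn "industry" (PySem.Str.lower s))) then
      alternative_sources ++ ["industry reports"] else alternative_sources
  "Check contradictory sources: " ++ PySem.Str.join ", " alternative_sources

-- ===== PORT B =====
-- table of all 8 possible suffixes, indexed by the presence mask g + 2a + 4i
def pvSuffixes : List String :=
  ["government registry data, peer-reviewed publications, industry reports",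
   "peer-reviewed publications, industry reports",
   "government registry data, industry reports",
   "industry reports",
   "government registry data, peer-reviewed publications",
   "peer-reviewed publications",
   "government registry data",
   ""]

-- the early-exiting scan (the `break` of Source B is the `if g && a && i` return)
def pvScan : List (List (String × String)) → Bool → Bool → Bool → Bool × Bool × Bool
  | [], g, a, i => (g, a, i)
  | e :: rest, g, a, i =>
    let low := PySem.Str.lower (PySem.Dict.getD (PySem.Dict.mk e) "source" "")
    let g := g || PySem.Str.isIn "government" low
    let a := a || PySem.Str.isIn "academic" low
    let i := i || PySem.Str.isIn "industry" low
    if g && a && i then (g, a, i) else pvScan rest g a i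

def find_contradictory_sources_py_alt (evidence : List (List (String × String))) : String :=
  let r := pvScan evidence false false false
  "Check contradictory sources: " ++ pvSuffixes.getD (r.1.toNat + 2 * r.2.1.toNat + 4 * r.2.2.toNat) ""

-- ===== PRECONDITION & SPEC =====
def Spec_find_contradictory_sources_py (evidence : List (List (String × String))) (out : String) : Prop := out = find_contradictory_sources_py_alt evidence
instance (evidence : List (List (String × String))) (out : String) : Decidable (Spec_find_contradictory_sources_py evidence out) := by unfold Spec_find_contradictory_sources_py; infer_instance

-- ===== CLAIM =====
def Claim_equal_find_contradictory_sources_py : Prop := ∀ (evidence : List (List (String × String))), Dom_find_contradictory_sources_py evidence → Spec_find_contradictory_sources_py evidence (find_contradictory_sources_py evidence)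

-- ===== LEMMAS AND PROOFS =====

def pvLowSrc (e : List (String × String)) : String :=
  PySem.Str.lower (PySem.Dict.getD (PySem.Dict.mk e) "source" "")

-- the early exit is harmless: pvScan just OR-accumulates the three any-scans
theorem pvScan_eq (l : List (List (String × String))) (g a i : Bool) :
    pvScan l g a i =
      (g || l.any (fun e => PySem.Str.isIn "government" (pvLowSrc e)),
       a || l.any (fun e => PySem.Str.isIn "academic" (pvLowSrc e)),
       i || l.any (fun e => PySem.Str.isIn "industry" (pvLowSrc e))) := by
  induction l generalizing g a i with
  | nil => simp [pvScan]
  | cons e rest ih =>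
    simp only [pvScan, List.any_cons, pvLowSrc]
    split
    · rename_i h
      obtain ⟨⟨hg, ha⟩, hi⟩ := by
        have := h
        simpa [Bool.and_eq_true] using this
      simp [← Bool.or_assoc, hg, ha, hi]
    · rw [ih]
      simp [Bool.or_assoc, pvLowSrc]

-- ===== VERDICT =====
theorem find_contradictory_sources_py_spec : Claim_equal_find_contradictory_sources_py := by
  intro evidence _
  unfold Spec_find_contradictory_sources_py
  unfold find_contradictory_sources_py find_contradictory_sources_py_alt
  rw [pvScan_eq]
  simp only [List.any_map, Function.comp_def, Bool.false_or, pvLowSrc]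
  cases evidence.any (fun e =>
      PySem.Str.isIn "government" (PySem.Str.lower (PySem.Dict.getD (PySem.Dict.mk e) "source" ""))) <;>
    cases evidence.any (fun e =>
        PySem.Str.isIn "academic" (PySem.Str.lower (PySem.Dict.getD (PySem.Dict.mk e) "source" ""))) <;>
      cases evidence.any (fun e =>
          PySem.Str.isIn "industry" (PySem.Str.lower (PySem.Dict.getD (PySem.Dict.mk e) "source" ""))) <;>
        simp only [pvSuffixes, Bool.not_true, Bool.not_false, if_true, Bool.toNat] <;> decide
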